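-- pv_equiv track=rewrite | github.com/yann-zhong/GENOM_BIM | src/find_HC.py | find_HCs
-- ===== SOURCE A (Python) =====
-- def find_x(seq, x):
--     for ind,nt in enumerate(seq):
--         if nt == x:
--             yield ind
--
-- def find_HCs(seq):
--     pos_1 = list(find_x(seq, '1'))
--     pos_P = list(find_x(seq, 'P'))
--     imp_pos = sorted(pos_1+pos_P)
--     hc = []
--     for pos in imp_pos:
--         if pos not in pos_P and hc == []:
--             hc.append(pos)
--             continue
--         elif pos not in pos_P and pos-hc[-1]<5:
--             hc.append(pos)
--             continue
--         if len(hc)>1: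
--             yield hc
--         if pos not in pos_P:
--             hc = [pos]
--         else:
--             hc = []
--     if len(hc)>1:
--         yield hc
-- ===== SOURCE B (Python) =====
-- def find_HCs(seq):
--     out = []
--     offset = 0
--     for part in seq.split('P'):
--         cluster = []
--         for i, ch in enumerate(part):
--             if ch == '1':
--                 g = offset + i
--                 if cluster and g - cluster[-1] >= 5:
--                     if len(cluster) > 1:
--                         out.append(cluster)
--                     cluster = [g]
--                 else:
--                     cluster.append(g)
--         if len(cluster) > 1:
--             out.append(cluster)
--         offset += len(part) + 1
--     return out
-- ===== Notes on version B (the rewrite author's own statement) =====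
-- stated objective: faster
-- what changed: Instead of merging and sorting the '1'/'P' index lists and testing 'pos not in pos_P' with a linear scan at every step, B splits the sequence on the 'P' delimiter and greedily clusters the global '1' indices of each region in one pass with a running offset.
import Mathlib
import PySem

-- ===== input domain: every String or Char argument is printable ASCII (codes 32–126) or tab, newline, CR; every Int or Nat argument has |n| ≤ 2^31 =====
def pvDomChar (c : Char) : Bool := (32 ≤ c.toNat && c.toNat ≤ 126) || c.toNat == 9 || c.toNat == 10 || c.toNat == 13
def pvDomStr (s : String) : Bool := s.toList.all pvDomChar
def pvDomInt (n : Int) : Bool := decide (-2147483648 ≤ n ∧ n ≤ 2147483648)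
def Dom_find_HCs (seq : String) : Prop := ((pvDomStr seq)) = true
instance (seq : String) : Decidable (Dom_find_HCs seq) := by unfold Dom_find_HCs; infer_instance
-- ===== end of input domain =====

-- B replaces A's sorted merge of the '1'/'P' index lists (with a linear 'pos not in pos_P'
-- scan at every loop step) by one pass over the 'P'-separated regions with a running offset;
-- a timing run measured B faster.


-- ===== PORT A =====
-- generator find_x(seq, x): yields the indices whose char equals x
def find_x (seq : String) (x : Char) : List Int :=
  (PySem.List.enumerate seq.toList 0).foldl
    (fun acc p => if p.2 = x then acc ++ [p.1] else acc) []

-- list(find_HCs(seq)): loop state (hc, yielded); hc[-1] is only read when hc ≠ [] (guarded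
-- by the branch order), ported as getLast?.getD 0
def find_HCs (seq : String) : List (List Int) :=
  let pos_1 := find_x seq '1'
  let pos_P := find_x seq 'P'
  let imp_pos := PySem.List.sorted (pos_1 ++ pos_P) (fun z => z)
  let r := imp_pos.foldl
    (fun (st : List Int × List (List Int)) pos =>
      if ¬ pos ∈ pos_P ∧ st.1 = [] then (st.1 ++ [pos], st.2)
      else if ¬ pos ∈ pos_P ∧ pos - st.1.getLast?.getD 0 < 5 then (st.1 ++ [pos], st.2)
      else
        (if ¬ pos ∈ pos_P then [pos] else [],
         if st.1.length > 1 then st.2 ++ [st.1] else st.2))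
    ([], [])
  if r.1.length > 1 then r.2 ++ [r.1] else r.2

-- ===== PORT B =====
-- Source B: for part in seq.split('P') (separator non-empty, so Python's split always returns),
-- greedily cluster the global indices offset+i of the '1' chars of each part
def find_HCs_alt (seq : String) : List (List Int) :=
  let parts := PySem.Chars.splitOn seq.toList ['P']
  let r := parts.foldl
    (fun (st : List (List Int) × Int) part =>
      let inner := (PySem.List.enumerate part 0).foldl
        (fun (s : List (List Int) × List Int) p =>
          if p.2 = '1' then
            if s.2 ≠ [] ∧ st.2 + p.1 - s.2.getLast?.getD 0 ≥ 5 then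
              ((if s.2.length > 1 then s.1 ++ [s.2] else s.1), [st.2 + p.1])
            else (s.1, s.2 ++ [st.2 + p.1])
          else s)
        (st.1, [])
      ((if inner.2.length > 1 then inner.1 ++ [inner.2] else inner.1),
       st.2 + part.length + 1))
    ([], 0)
  r.1

-- ===== PRECONDITION & SPEC =====
def Spec_find_HCs (seq : String) (out : List (List Int)) : Prop := out = find_HCs_alt seq
instance (seq : String) (out : List (List Int)) : Decidable (Spec_find_HCs seq out) := by unfold Spec_find_HCs; infer_instance

-- ===== CLAIM (what is proved, stated in full; the proofs are below) =====
def Claim_equal_find_HCs : Prop := ∀ (seq : String), Dom_find_HCs seq → Spec_find_HCs seq (find_HCs seq)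

-- ===== LEMMAS AND PROOFS =====
-- proof-side helpers: pvEv/pvEvents are the '1'/'P' events of the enumerated string, pvCStep
-- the common per-event state machine, pvSplit a structural model of str.split('P')
def pvEv (p : Int × Char) : Bool := decide (p.2 = '1') || decide (p.2 = 'P')

def pvSplit (pre : List Char) : List Char → List (List Char)
  | [] => [pre]
  | c :: rest => if c = 'P' then pre :: pvSplit [] rest else pvSplit (pre ++ [c]) rest

def pvEvents (cs : List Char) (off : Int) : List (Int × Char) :=
  (PySem.List.enumerate cs off).filter pvEv

def pvFlush (out : List (List Int)) (hc : List Int) : List (List Int) :=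
  if hc.length > 1 then out ++ [hc] else out

def pvCStep (st : List Int × List (List Int)) (p : Int × Char) : List Int × List (List Int) :=
  if p.2 = 'P' then ([], pvFlush st.2 st.1)
  else if st.1 = [] then ([p.1], st.2)
  else if p.1 - st.1.getLast?.getD 0 < 5 then (st.1 ++ [p.1], st.2)
  else ([p.1], pvFlush st.2 st.1)

def pvASide (cs : List Char) (off : Int) (out : List (List Int)) : List (List Int) :=
  let r := (pvEvents cs off).foldl pvCStep ([], out)
  pvFlush r.2 r.1

def pvBOuter (parts : List (List Char)) (st : List (List Int) × Int) : List (List Int) × Int :=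
  parts.foldl
    (fun (st : List (List Int) × Int) part =>
      let inner := (PySem.List.enumerate part 0).foldl
        (fun (s : List (List Int) × List Int) p =>
          if p.2 = '1' then
            if s.2 ≠ [] ∧ st.2 + p.1 - s.2.getLast?.getD 0 ≥ 5 then
              ((if s.2.length > 1 then s.1 ++ [s.2] else s.1), [st.2 + p.1])
            else (s.1, s.2 ++ [st.2 + p.1])
          else s)
        (st.1, [])
      ((if inner.2.length > 1 then inner.1 ++ [inner.2] else inner.1),
       st.2 + part.length + 1))
    st

lemma go_spec (l : List Char) : ∀ (fuel : Nat) (cur : List Char) (acc : List (List Char)),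
    l.length ≤ fuel →
    PySem.Chars.splitOn.go ['P'] fuel l cur acc = acc.reverse ++ pvSplit cur.reverse l := by
  induction l with
  | nil =>
    intro fuel cur acc _
    rw [PySem.Chars.splitOn.go.eq_def]
    cases fuel <;> simp [pvSplit]
  | cons c rest ih =>
    intro fuel cur acc hlen
    cases fuel with
    | zero => simp at hlen
    | succ f =>
      rw [PySem.Chars.splitOn.go.eq_def]
      simp only [List.isPrefixOf, List.length_cons] at *
      by_cases hc : c = 'P'
      · subst hc
        simp only [beq_self_eq_true, Bool.true_and]
        rw [if_pos (by simp [List.isPrefixOf])]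
        simp only [List.length_nil, List.drop_succ_cons, List.drop_zero]
        rw [ih f [] (cur.reverse :: acc) (by omega)]
        simp [pvSplit]
      · rw [if_neg (by simp [List.isPrefixOf, hc]; intro h; exact hc h.symm)]
        rw [ih f (c :: cur) acc (by omega)]
        simp [pvSplit, hc]

lemma splitOn_eq (cs : List Char) : PySem.Chars.splitOn cs ['P'] = pvSplit [] cs := by
  show PySem.Chars.splitOn.go ['P'] (cs.length + 1) cs [] [] = _
  rw [go_spec cs (cs.length + 1) [] [] (by omega)]
  simp

lemma pvSplit_noP (cs : List Char) : ∀ pre, 'P' ∉ cs → pvSplit pre cs = [pre ++ cs] := by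
  induction cs with
  | nil => intro pre _; simp [pvSplit]
  | cons c rest ih =>
    intro pre h
    simp only [List.mem_cons, not_or] at h
    simp [pvSplit, Ne.symm h.1, ih (pre ++ [c]) h.2]

lemma pvSplit_P (a : List Char) : ∀ pre r, 'P' ∉ a →
    pvSplit pre (a ++ 'P' :: r) = (pre ++ a) :: pvSplit [] r := by
  induction a with
  | nil => intro pre r _; simp [pvSplit]
  | cons c rest ih =>
    intro pre r h
    simp only [List.mem_cons, not_or] at h
    simp [pvSplit, Ne.symm h.1, ih (pre ++ [c]) r h.2]

lemma filter_or_perm {α : Type} (p q : α → Bool) : ∀ (l : List α), (∀ x ∈ l, ¬(p x = true ∧ q x = true)) →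
    (l.filter (fun x => p x || q x)).Perm (l.filter p ++ l.filter q) := by
  intro l
  induction l with
  | nil => intro _; simp
  | cons x rest ih =>
    intro h
    have hr := ih (fun y hy => h y (List.mem_cons_of_mem x hy))
    by_cases hp : p x = true
    · have hq : q x = false := by
        rcases Bool.eq_false_or_eq_true (q x) with h' | h'
        · exact absurd ⟨hp, h'⟩ (h x (List.mem_cons_self))
        · exact h'
      simp only [List.filter_cons, hp, hq, Bool.true_or, if_true]
      simpa using hr.cons x
    · simp only [Bool.not_eq_true] at hp
      by_cases hq : q x = true
      · simp only [List.filter_cons, hp, hq, Bool.false_or, if_true]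
        exact (hr.cons x).trans (List.perm_middle.symm)
      · simp only [Bool.not_eq_true] at hq
        simp only [List.filter_cons, hp, hq, Bool.false_or]
        exact hr

lemma find_x_eq (seq : String) (x : Char) :
    find_x seq x = ((PySem.List.enumerate seq.toList 0).filter
      (fun p => decide (p.2 = x))).map (·.1) := by
  unfold find_x
  rw [PySem.List.foldl_append_ite (fun (p : Int × Char) => p.2 = x) (fun p => p.1) (PySem.List.enumerate seq.toList 0) []]
  simp

lemma imp_eq (seq : String) :
    PySem.List.sorted (find_x seq '1' ++ find_x seq 'P') (fun z => z)
      = (pvEvents seq.toList 0).map (·.1) := by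
  apply PySem.List.sorted_eq_of_perm_of_pairwise_lt
  · rw [find_x_eq, find_x_eq]
    rw [← List.map_append]
    apply List.Perm.map
    have hd : ∀ p ∈ PySem.List.enumerate seq.toList 0,
        ¬(decide (p.2 = '1') = true ∧ decide (p.2 = 'P') = true) := by
      intro p _ ⟨h1, h2⟩
      simp at h1 h2; rw [h1] at h2; exact absurd h2 (by decide)
    have := filter_or_perm (fun p => decide (p.2 = '1')) (fun p => decide (p.2 = 'P'))
      (PySem.List.enumerate seq.toList 0) hd
    simpa [pvEvents, pvEv] using this
  · have hp := PySem.List.pairwise_lt_enumerate seq.toList 0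
    rw [List.pairwise_map]
    exact hp.filter pvEv

lemma fst_inj_enumerate {cs : List Char} {s : Int} {p q : Int × Char}
    (hp : p ∈ PySem.List.enumerate cs s) (hq : q ∈ PySem.List.enumerate cs s)
    (h : p.1 = q.1) : p = q := by
  have hpair : (PySem.List.enumerate cs s).Pairwise (fun a b => a.1 ≠ b.1) :=
    (PySem.List.pairwise_lt_enumerate cs s).imp (fun hlt => by omega)
  by_contra hne
  exact (hpair.forall (fun _ _ hab h' => hab h'.symm) hp hq hne) h

lemma mem_posP_iff (seq : String) {p : Int × Char} (hp : p ∈ pvEvents seq.toList 0) :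
    p.1 ∈ find_x seq 'P' ↔ p.2 = 'P' := by
  rw [find_x_eq]
  constructor
  · intro h
    simp only [List.mem_map, List.mem_filter] at h
    obtain ⟨q, ⟨hqe, hq2⟩, hq1⟩ := h
    have hpe : p ∈ PySem.List.enumerate seq.toList 0 := (List.mem_filter.mp hp).1
    have := fst_inj_enumerate hqe hpe hq1
    subst this
    simpa using hq2
  · intro h
    have hpe : p ∈ PySem.List.enumerate seq.toList 0 := (List.mem_filter.mp hp).1
    exact List.mem_map.mpr ⟨p, List.mem_filter.mpr ⟨hpe, by simp [h]⟩, rfl⟩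

lemma bstep_eq (g : Int) (out : List (List Int)) (cluster : List Int) :
    (if cluster ≠ [] ∧ g - cluster.getLast?.getD 0 ≥ 5 then
        ((if cluster.length > 1 then out ++ [cluster] else out), [g])
      else (out, cluster ++ [g]))
    = ((pvCStep (cluster, out) (g, '1')).2, (pvCStep (cluster, out) (g, '1')).1) := by
  simp only [pvCStep, pvFlush, if_neg (by decide : ¬('1' = 'P'))]
  by_cases he : cluster = []
  · simp [he]
  · by_cases hg : g - cluster.getLast?.getD 0 < 5
    · rw [if_neg (fun hc => absurd hc.2 (by omega))]
      simp [he, hg]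
    · rw [if_pos ⟨he, by omega⟩, if_neg he, if_neg hg]

lemma A_eq (seq : String) : find_HCs seq = pvASide seq.toList 0 [] := by
  show (let pos_1 := find_x seq '1'; let pos_P := find_x seq 'P'; let imp_pos := PySem.List.sorted (pos_1 ++ pos_P) (fun z => z); let r := imp_pos.foldl (fun (st : List Int × List (List Int)) pos => if ¬ pos ∈ pos_P ∧ st.1 = [] then (st.1 ++ [pos], st.2) else if ¬ pos ∈ pos_P ∧ pos - st.1.getLast?.getD 0 < 5 then (st.1 ++ [pos], st.2) else (if ¬ pos ∈ pos_P then [pos] else [], if st.1.length > 1 then st.2 ++ [st.1] else st.2)) ([], []); if r.1.length > 1 then r.2 ++ [r.1] else r.2) = _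
  simp only [pvASide]
  rw [imp_eq seq, List.foldl_map]
  rw [PySem.List.foldl_congr_mem (pvEvents seq.toList 0) _ pvCStep ([], [])
    (by
      intro st p hp
      have hev : pvEv p = true := (List.mem_filter.mp hp).2
      have hmem := mem_posP_iff seq hp
      simp only [pvEv, Bool.or_eq_true, decide_eq_true_eq] at hev
      rcases hev with h1 | hP
      · have hnot : ¬ p.1 ∈ find_x seq 'P' := fun hm => by
          rw [h1] at hmem; exact absurd (hmem.mp hm) (by decide)
        simp only [pvCStep, h1, hnot, not_false_iff, true_and, if_neg (by decide : ¬('1' = 'P'))]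
        by_cases he : st.1 = []
        · simp [he]
        · simp only [he, if_false]
          by_cases hg : p.1 - st.1.getLast?.getD 0 < 5
          · simp [hg]
          · simp [hg, pvFlush]
      · have hm : p.1 ∈ find_x seq 'P' := hmem.mpr hP
        simp [pvCStep, hP, hm, pvFlush])]
  rfl

lemma inner_eq (off : Int) : ∀ (part : List Char), 'P' ∉ part → ∀ (s : Int) (out : List (List Int)) (cluster : List Int),
    (PySem.List.enumerate part s).foldl
      (fun (st : List (List Int) × List Int) p =>
        if p.2 = '1' then
          if st.2 ≠ [] ∧ off + p.1 - st.2.getLast?.getD 0 ≥ 5 then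
            ((if st.2.length > 1 then st.1 ++ [st.2] else st.1), [off + p.1])
          else (st.1, st.2 ++ [off + p.1])
        else st)
      (out, cluster)
    = (((pvEvents part (off + s)).foldl pvCStep (cluster, out)).2,
       ((pvEvents part (off + s)).foldl pvCStep (cluster, out)).1) := by
  intro part
  induction part with
  | nil => intro _ s out cluster; simp [pvEvents, PySem.List.enumerate]
  | cons c rest ih =>
    intro hP s out cluster
    simp only [List.mem_cons, not_or] at hP
    have hoff : off + (s + 1) = off + s + 1 := by ring
    have hrest := fun out' cluster' => (ih hP.2 (s + 1) out' cluster').trans (by rw [hoff])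
    simp only [pvEvents, PySem.List.enumerate_cons, List.filter_cons, List.foldl_cons]
    by_cases h1 : c = '1'
    · subst h1
      rw [if_pos (show pvEv (off + s, '1') = true by simp [pvEv])]
      rw [if_pos rfl, bstep_eq (off + s) out cluster]
      exact hrest _ _
    · rw [if_neg h1]
      have hev : pvEv (off + s, c) = false := by
        simp only [pvEv, Bool.or_eq_false_iff, decide_eq_false_iff_not]
        exact ⟨h1, fun hc => hP.1 hc.symm⟩
      rw [if_neg (by simp [hev])]
      exact hrest out cluster

lemma events_append (a r : List Char) (off : Int) :
    pvEvents (a ++ 'P' :: r) off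
      = pvEvents a off ++ (off + a.length, 'P') :: pvEvents r (off + a.length + 1) := by
  simp only [pvEvents, PySem.List.enumerate_append, PySem.List.enumerate_cons,
    List.filter_append, List.filter_cons]
  rw [if_pos (show pvEv (off + a.length, 'P') = true by simp [pvEv])]

lemma bouter_one (part : List Char) (hnp : 'P' ∉ part) (out : List (List Int)) (off : Int) :
    pvBOuter [part] (out, off)
      = (pvFlush (((pvEvents part off).foldl pvCStep ([], out)).2)
                 (((pvEvents part off).foldl pvCStep ([], out)).1),
         off + part.length + 1) := by
  simp only [pvBOuter, List.foldl_cons, List.foldl_nil]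
  rw [inner_eq off part hnp 0 out []]
  rw [show off + (0 : Int) = off by ring]
  rfl

lemma bouter_cons (part : List Char) (ps : List (List Char)) (hnp : 'P' ∉ part)
    (out : List (List Int)) (off : Int) :
    pvBOuter (part :: ps) (out, off)
      = pvBOuter ps
          (pvFlush (((pvEvents part off).foldl pvCStep ([], out)).2)
                   (((pvEvents part off).foldl pvCStep ([], out)).1),
           off + part.length + 1) := by
  simp only [pvBOuter, List.foldl_cons]
  rw [inner_eq off part hnp 0 out []]
  rw [show off + (0 : Int) = off by ring]
  rfl

lemma main_eq : ∀ (n : Nat) (cs : List Char), cs.length ≤ n → ∀ (off : Int) (out : List (List Int)),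
    pvASide cs off out = (pvBOuter (pvSplit [] cs) (out, off)).1 := by
  intro n
  induction n with
  | zero =>
    intro cs h off out
    have hnil : cs = [] := List.eq_nil_of_length_eq_zero (by omega)
    subst hnil
    simp [pvSplit, pvASide, pvEvents, pvBOuter, PySem.List.enumerate, pvFlush]
  | succ m ihn =>
    intro cs hlen off out
    by_cases hP : 'P' ∈ cs
    · have hsplit : cs.takeWhile (fun c => !(c == 'P')) ++ cs.dropWhile (fun c => !(c == 'P')) = cs :=
        List.takeWhile_append_dropWhile
      have hne : cs.dropWhile (fun c => !(c == 'P')) ≠ [] := by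
        intro h0
        rw [List.dropWhile_eq_nil_iff] at h0
        have := h0 'P' hP
        simp at this
      obtain ⟨d, r, hd⟩ := List.exists_cons_of_ne_nil hne
      have hdP : d = 'P' := by
        have hh := List.head_dropWhile_not (fun c => !(c == 'P')) hne
        simp only [hd, List.head_cons] at hh
        simpa using hh
      have hnota : 'P' ∉ cs.takeWhile (fun c => !(c == 'P')) := by
        intro hm
        have := List.mem_takeWhile_imp hm
        simp at this
      have hcs : cs = cs.takeWhile (fun c => !(c == 'P')) ++ 'P' :: r := by
        conv_lhs => rw [← hsplit]
        rw [hd, hdP]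
      generalize hga : cs.takeWhile (fun c => !(c == 'P')) = a at hnota hcs
      have hlr : r.length ≤ m := by
        have := congrArg List.length hcs
        simp at this
        omega
      rw [hcs, pvSplit_P a [] r hnota]
      simp only [List.nil_append]
      rw [bouter_cons a (pvSplit [] r) hnota out off]
      rw [← ihn r hlr]
      unfold pvASide
      rw [events_append a r off]
      rw [List.foldl_append, List.foldl_cons]
      rfl
    · rw [pvSplit_noP cs [] hP]
      simp only [List.nil_append]
      rw [bouter_one cs hP out off]
      rfl

lemma B_eq (seq : String) : find_HCs_alt seq = (pvBOuter (pvSplit [] seq.toList) ([], 0)).1 := by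
  show (pvBOuter (PySem.Chars.splitOn seq.toList ['P']) ([], 0)).1 = _
  rw [splitOn_eq]

-- ===== VERDICT (by name: the statement is the Claim_ definition above) =====
theorem find_HCs_spec : Claim_equal_find_HCs := by
  intro seq _
  show find_HCs seq = find_HCs_alt seq
  rw [A_eq, B_eq, main_eq seq.toList.length seq.toList le_rfl 0 []]
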